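-- pv_equiv track=rewrite | github.com/Sepremo/Projetos-do-IST | Fundamentos de Programação/Projeto1_v4.py | corrigir_doc
-- ===== SOURCE A (Python) =====
-- def corrigir_palavra(string):
--     """Corrige a palavra, apagando erros tipo "aA"
--
--     Usa o código ASCII associado a cada letra para detetar e apagar letras
--     maiúsculas seguidas da sua versão minúscula e vice-versa (ex: Aa; bB)
--     """
--     i = 0
--     while i + 1 < len(string):
--         #nºASCII de uma letra maiúscula +32 = nºASCII dessa letra minúscula
--         if abs(ord(string[i]) - ord(string[i + 1])) == 32:
--             string = string[0:i] + string[i + 2:]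
--             if i < 2:
--                 i = -1
--             else:
--                 i = i - 2
--         i += 1
--     return string
--
-- def eh_anagrama(string1, string2):
--     """Diz se as palavras são anagramas uma da outra
--
--     Avalio se cada tipo de caracter aparece o mesmo número de vezes em ambas as
--     palavras em string1 e string2. Se sim, retorna True, caso contrario, string1
--     não é anagrama de string2 e retorna Falso
--     """
--     string1 = string1.lower()
--     string2 = string2.lower()
--
--     string1= sorted(string1)
--     string2= sorted(string2)
--     return string1 == string2
--
-- def corrigir_doc(Texto):
--     """Verifica que o texto é válido e corrije, se válido
--
--     Uso o código ASCII para verificar que o Texto tem apenas palavras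
--     constituídas por letras e espaços entre as palavras. Depois corrigo as
--     palavras e vejo se são anagramas umas das outras, apagando o segundo
--     anagrama que encontro. Retorna uma string do Texto corrigido
--     """
--     if type(Texto) != str or len(Texto) == 0:
--         raise ValueError("corrigir_doc: argumento invalido")
--
--     for i in  range(len(Texto) -1):
--         #Verifica que o Texto tem só letras ou espaços
--         if not all(car.isalpha() or car.isspace() for car in Texto):
--             raise ValueError("corrigir_doc: argumento invalido")
--
--         #Verifica que um espaço não é seguido por outro espaço
--         if Texto[i].isspace() and Texto[i + 1].isspace():
--             raise ValueError("corrigir_doc: argumento invalido")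
--         i += 1
--
--
--     listaTexto = Texto.split()
--     listaTexto = [corrigir_palavra(palavra) for palavra in listaTexto]
--
--     i1 = 0
--     while i1 < len(listaTexto):
--         palavra = listaTexto[i1]
--         i2 = i1 + 1
--         while i2 < len(listaTexto):
--
--             #Apaga o segundo anagrama, exepto quando é a mesma palavra
--             if eh_anagrama(palavra, listaTexto[i2]) and \
--             palavra.lower() != listaTexto[i2].lower():
--                 listaTexto.remove(listaTexto[i2])
--
--             else: i2 += 1
--         i1 += 1
--     return (" ".join(listaTexto))
-- ===== SOURCE B (Python) =====
-- def corrigir_doc(Texto):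
--     if type(Texto) != str or len(Texto) == 0:
--         raise ValueError("corrigir_doc: argumento invalido")
--     if not all(c.isalpha() or c.isspace() for c in Texto):
--         raise ValueError("corrigir_doc: argumento invalido")
--     if any(a.isspace() and b.isspace() for a, b in zip(Texto, Texto[1:])):
--         raise ValueError("corrigir_doc: argumento invalido")
--     kept = []
--     seen = {}  # anagram key (sorted lowercase letters) -> lowercase of the first kept word
--     for palavra in Texto.split():
--         stack = []
--         for c in palavra:
--             if stack and abs(ord(stack[-1]) - ord(c)) == 32:
--                 stack.pop()
--             else:
--                 stack.append(c)
--         w = ''.join(stack)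
--         low = w.lower()
--         k = ''.join(sorted(low))
--         if k not in seen:
--             seen[k] = low
--             kept.append(w)
--         elif seen[k] == low:
--             kept.append(w)
--     return " ".join(kept)
-- ===== Notes on version B (the rewrite author's own statement) =====
-- stated objective: faster
-- what changed: Quadratic index-backtracking string surgery for aA-pair removal is replaced by a linear stack cancellation, and the O(n^2) nested scan-and-remove anagram deduplication is replaced by a single pass over the words with a dict keyed by the sorted lowercase letters (mapping each anagram key to the lowercase of its first kept word); validation becomes one linear pass instead of re-running all() for every index.
-- outside the precondition, e.g. on corrigir_doc('!'): A returns '!', B raises ValueError; on corrigir_doc('5'): A returns '5', B raises ValueError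
import Mathlib
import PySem

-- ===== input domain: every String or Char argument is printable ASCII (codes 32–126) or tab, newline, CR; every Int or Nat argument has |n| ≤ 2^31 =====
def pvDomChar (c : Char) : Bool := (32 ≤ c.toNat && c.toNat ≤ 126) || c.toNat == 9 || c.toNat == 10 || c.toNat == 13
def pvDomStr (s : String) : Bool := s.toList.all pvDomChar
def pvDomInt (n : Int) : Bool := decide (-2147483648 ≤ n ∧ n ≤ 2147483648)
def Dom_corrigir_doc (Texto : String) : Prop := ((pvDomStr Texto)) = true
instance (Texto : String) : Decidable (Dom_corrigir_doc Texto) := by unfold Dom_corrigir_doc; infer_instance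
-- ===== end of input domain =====

-- B replaces A's quadratic index-backtracking pair deletion and O(n^2) nested anagram
-- removal by a linear stack cancellation and a single dict-keyed pass (objective: faster).
-- Equivalence is about the RETURN value; neither program mutates its argument.

-- shared one-line predicates (the literal tests both Pythons write)
def pvCancel (a c : Char) : Bool := ((a.toNat : Int) - (c.toNat : Int)).natAbs == 32
def pvOkChar (c : Char) : Bool := PySem.Chars.isalpha c || PySem.Chars.isspace c

-- ===== PORT A =====

-- termination measures, cited by name from the decreasing_by clauses below
theorem pvLenTakeDrop (s : List Char) (i : Nat) (h : i + 1 < s.length) :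
    (s.take i ++ s.drop (i+2)).length = s.length - 2 := by
  rw [List.length_append, List.length_take, List.length_drop,
      Nat.min_eq_left (le_of_lt (Nat.lt_of_succ_lt h)),
      ← Nat.sub_sub, ← Nat.add_sub_assoc (Nat.le_sub_of_add_le (Nat.add_comm 2 i ▸ h)),
      Nat.add_sub_cancel' (le_of_lt (Nat.lt_of_succ_lt h))]

theorem pvFourSub (i : Nat) (h : 2 ≤ i) : 4 + (i - 1) = i + 3 := by
  rw [Nat.add_comm, ← Nat.sub_add_comm (le_trans (by decide) h),
      show (4:Nat) = 3 + 1 from rfl, ← Nat.add_assoc, Nat.add_sub_cancel]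

theorem pvPalavraLoop_dec1 (s : List Char) (i : Nat) (h : i + 1 < s.length) :
    2 * (s.take i ++ s.drop (i+2)).length - (if i < 2 then 0 else i - 1) < 2 * s.length - i := by
  rw [pvLenTakeDrop s i h, Nat.mul_sub]
  have hi2 : i < 2 * s.length :=
    lt_of_lt_of_le (Nat.lt_of_succ_lt h) (Nat.le_mul_of_pos_left s.length two_pos)
  split
  · rename_i h2
    rw [Nat.sub_zero, show (2:Nat)*2 = 4 from rfl]
    exact Nat.sub_lt_sub_left hi2 (lt_of_lt_of_le h2 (by decide))
  · rename_i h2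
    rw [show (2:Nat)*2 = 4 from rfl, Nat.sub_sub, pvFourSub i (Nat.le_of_not_lt h2)]
    exact Nat.sub_lt_sub_left hi2 (Nat.lt_add_of_pos_right (by decide))

theorem pvPalavraLoop_dec2 (s : List Char) (i : Nat) (h : i + 1 < s.length) :
    2 * s.length - (i+1) < 2 * s.length - i :=
  Nat.sub_lt_sub_left
    (lt_of_lt_of_le (Nat.lt_of_succ_lt h) (Nat.le_mul_of_pos_left s.length two_pos))
    (Nat.lt_succ_self i)

-- corrigir_palavra's while loop (index i, string surgery s[0:i]+s[i+2:], backtrack)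
def pvPalavraLoop (s : List Char) (i : Nat) : List Char :=
  if _h : i + 1 < s.length then
    if pvCancel (s.getD i ' ') (s.getD (i+1) ' ') then
      pvPalavraLoop (s.take i ++ s.drop (i+2)) (if i < 2 then 0 else i - 1)
    else pvPalavraLoop s (i+1)
  else s
termination_by 2 * s.length - i
decreasing_by
  · exact pvPalavraLoop_dec1 s i _h
  · exact pvPalavraLoop_dec2 s i _h

def corrigir_palavra (s : List Char) : List Char := pvPalavraLoop s 0

def eh_anagrama (s1 s2 : List Char) : Bool :=
  PySem.List.sorted (PySem.Chars.lower s1) (fun c => c) false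
    == PySem.List.sorted (PySem.Chars.lower s2) (fun c => c) false

-- the inner-loop deletion test of corrigir_doc
def pvCondA (p w : List Char) : Bool :=
  eh_anagrama p w && !(PySem.Chars.lower p == PySem.Chars.lower w)

theorem pvLoop2_dec1 (l l' : List (List Char)) (i2 : Nat) (h : i2 < l.length)
    (hr : PySem.List.remove? l (l.getD i2 []) = some l') :
    l'.length - i2 < l.length - i2 := by
  have hv : l.getD i2 [] ∈ l := by
    rw [List.getD_eq_getElem _ _ h]; exact List.getElem_mem h
  rw [PySem.List.remove?_eq_some_erase l _ hv] at hr
  injection hr with hr'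
  rw [← hr', List.length_erase_of_mem hv, Nat.sub_sub, Nat.add_comm]
  exact Nat.sub_lt_sub_left h (Nat.lt_add_of_pos_right (by decide))

theorem pvLoop2_dec2 (n i2 : Nat) (h : i2 < n) : n - (i2+1) < n - i2 :=
  Nat.sub_lt_sub_left h (Nat.lt_succ_self i2)

-- inner while over i2 (list.remove of the first occurrence of the value)
def pvLoop2 (l : List (List Char)) (p : List Char) (i2 : Nat) : List (List Char) :=
  if _h : i2 < l.length then
    if pvCondA p (l.getD i2 []) then
      match _hr : PySem.List.remove? l (l.getD i2 []) with
      | some l' => pvLoop2 l' p i2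
      | none => l   -- ValueError of list.remove: unreachable, the value is in the list
    else pvLoop2 l p (i2+1)
  else l
termination_by l.length - i2
decreasing_by
  · exact pvLoop2_dec1 l l' i2 _h _hr
  · exact pvLoop2_dec2 l.length i2 _h

-- cited by pvLoop1's decreasing_by (the inner loop only removes elements)
theorem pvLoop2_length_le (l : List (List Char)) (p : List Char) (i2 : Nat) :
    (pvLoop2 l p i2).length ≤ l.length := by
  rw [pvLoop2]
  split
  · rename_i h
    split
    · rename_i hc
      split
      · rename_i l' hr
        have h1 := pvLoop2_dec1 l l' i2 h hr
        have h2 := pvLoop2_length_le l' p i2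
        have hv : l.getD i2 [] ∈ l := by
          rw [List.getD_eq_getElem _ _ h]; exact List.getElem_mem h
        rw [PySem.List.remove?_eq_some_erase l _ hv] at hr
        injection hr with hr'
        subst hr'
        rw [List.length_erase_of_mem hv] at h2
        exact le_trans h2 (Nat.sub_le l.length 1)
      · exact le_refl _
    · exact pvLoop2_length_le l p (i2+1)
  · exact le_refl _
termination_by l.length - i2
decreasing_by
  · exact pvLoop2_dec2 l.length i2 ‹i2 < l.length›
  · exact h1

theorem pvLoop1_dec (l : List (List Char)) (i1 : Nat) (h : i1 < l.length) :
    (pvLoop2 l (l.getD i1 []) (i1+1)).length - (i1+1) < l.length - i1 :=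
  lt_of_le_of_lt
    (Nat.sub_le_sub_right (pvLoop2_length_le l (l.getD i1 []) (i1+1)) (i1+1))
    (pvLoop2_dec2 l.length i1 h)

-- outer while over i1
def pvLoop1 (l : List (List Char)) (i1 : Nat) : List (List Char) :=
  if _h : i1 < l.length then
    pvLoop1 (pvLoop2 l (l.getD i1 []) (i1+1)) (i1+1)
  else l
termination_by l.length - i1
decreasing_by
  exact pvLoop1_dec l i1 _h

def corrigir_doc (Texto : String) : String :=
  let cs := Texto.toList
  if cs.length = 0 then ""   -- raise ValueError
  else if !((List.range (cs.length - 1)).all fun i =>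
      (cs.all pvOkChar) &&
      !(PySem.Chars.isspace (cs.getD i ' ') && PySem.Chars.isspace (cs.getD (i+1) ' '))) then
    ""   -- raise ValueError
  else
    String.ofList (PySem.Chars.join [' ']
      (pvLoop1 ((PySem.Chars.split₀ cs).map corrigir_palavra) 0))

-- ===== PORT B =====

-- linear stack cancellation (top of stack = head)
def pvStackStep (st : List Char) (c : Char) : List Char :=
  match st with
  | t :: r => if pvCancel t c then r else c :: t :: r
  | [] => [c]

def pvCorrWord (w : List Char) : List Char := (w.foldl pvStackStep []).reverse

-- dedup step on the already-corrected word: dict anagram-key -> lowercase of first kept word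
def pvBCore (st : PySem.Dict (List Char) (List Char) × List (List Char)) (w : List Char) :
    PySem.Dict (List Char) (List Char) × List (List Char) :=
  let low := PySem.Chars.lower w
  let k := PySem.List.sorted low (fun c => c) false
  match st.1.get? k with
  | none => (st.1.insert k low, st.2 ++ [w])
  | some v => (st.1, if v == low then st.2 ++ [w] else st.2)

def pvBStep (st : PySem.Dict (List Char) (List Char) × List (List Char)) (palavra : List Char) :
    PySem.Dict (List Char) (List Char) × List (List Char) :=
  pvBCore st (pvCorrWord palavra)

def corrigir_doc_alt (Texto : String) : String :=
  let cs := Texto.toList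
  if cs.length = 0 then ""   -- raise ValueError
  else if !(cs.all pvOkChar) then ""   -- raise ValueError
  else if (cs.zip cs.tail).any
      (fun ab => PySem.Chars.isspace ab.1 && PySem.Chars.isspace ab.2) then ""   -- raise ValueError
  else
    String.ofList (PySem.Chars.join [' ']
      (((PySem.Chars.split₀ cs).foldl pvBStep (PySem.Dict.empty, [])).2))

-- ===== PRECONDITION & SPEC =====
-- Pre_ excludes the texts where A raises ValueError (empty, a non-letter/space character,
-- two adjacent whitespace characters) and additionally the single-character texts whose only
-- character is not a letter or space: on those A's `range(len(Texto)-1)` validation loop never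
-- runs, so A returns the text unvalidated, while B validates every text and raises there.
def Pre_corrigir_doc (Texto : String) : Prop :=
  Texto.toList ≠ [] ∧ Texto.toList.all pvOkChar = true ∧
  (Texto.toList.zip Texto.toList.tail).all
    (fun ab => !(PySem.Chars.isspace ab.1 && PySem.Chars.isspace ab.2)) = true
instance (Texto : String) : Decidable (Pre_corrigir_doc Texto) := by
  unfold Pre_corrigir_doc; infer_instance

def pvWitness_corrigir_doc : String := "ola Mundo"

def Spec_corrigir_doc (Texto : String) (out : String) : Prop := out = corrigir_doc_alt Texto
instance (Texto : String) (out : String) : Decidable (Spec_corrigir_doc Texto out) := by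
  unfold Spec_corrigir_doc; infer_instance

-- ===== CLAIM (what is proved, stated in full; the proofs are below) =====
def Claim_equal_corrigir_doc : Prop :=
  ∀ (Texto : String), Dom_corrigir_doc Texto → Pre_corrigir_doc Texto →
    Spec_corrigir_doc Texto (corrigir_doc Texto)

-- ===== LEMMAS AND PROOFS =====

theorem pvCondA_self (p : List Char) : pvCondA p p = false := by
  simp [pvCondA]

theorem pvCondA_comm (a b : List Char) : pvCondA a b = pvCondA b a := by
  simp only [pvCondA, eh_anagrama]
  rw [@BEq.comm _ _ _ (PySem.List.sorted (PySem.Chars.lower a) (fun c => c) false),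
      @BEq.comm _ _ _ (PySem.Chars.lower a)]

-- (s.take i ++ X).getD k = s.getD k for k < i
theorem pvGetD_prefix {α : Type} (s X : List α) (k i : Nat) (d : α)
    (hk : k < i) (hi : i ≤ s.length) : (s.take i ++ X).getD k d = s.getD k d := by
  have hkl : k < (s.take i).length := by simp; omega
  rw [List.getD_eq_getElem _ _ (by simp [List.length_append]; omega),
      List.getElem_append_left hkl, List.getElem_take,
      List.getD_eq_getElem _ _ (by omega)]

theorem pvRevTakeSucc (s : List Char) (k : Nat) (hk : k < s.length) :
    (s.take (k+1)).reverse = s.getD k ' ' :: (s.take k).reverse := by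
  rw [List.take_succ, List.getElem?_eq_getElem hk, List.getD_eq_getElem _ _ hk]
  simp

theorem pvPushStep (s : List Char) (k : Nat) (hk : k < s.length)
    (h : k = 0 ∨ pvCancel (s.getD (k-1) ' ') (s.getD k ' ') = false) :
    pvStackStep ((s.take k).reverse) (s.getD k ' ') = (s.take (k+1)).reverse := by
  rw [pvRevTakeSucc s k hk]
  rcases h with h0 | hc
  · subst h0; simp [pvStackStep]
  · rcases Nat.eq_zero_or_pos k with h0 | hpos
    · subst h0; simp [pvStackStep]
    · have hk1 : k - 1 < s.length := by omega
      have heq := pvRevTakeSucc s (k-1) hk1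
      rw [show k - 1 + 1 = k by omega] at heq
      rw [heq]
      have hc' : pvCancel (s[k-1]?.getD ' ') (s[k]?.getD ' ') = false := by
        simpa [List.getD] using hc
      simp [pvStackStep, hc']

theorem pvPalavraLoop_eq_stack (s : List Char) (i : Nat) (hi : i ≤ s.length)
    (hpre : ∀ j, j + 1 ≤ i → pvCancel (s.getD j ' ') (s.getD (j+1) ' ') = false) :
    pvPalavraLoop s i = ((s.drop i).foldl pvStackStep (s.take i).reverse).reverse := by
  rw [pvPalavraLoop]
  split
  · rename_i h
    have hi0 : i < s.length := by omega
    have hi1 : i + 1 < s.length := h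
    have hdropi : s.drop i = s.getD i ' ' :: s.drop (i+1) := by
      rw [List.getD_eq_getElem _ _ hi0]; exact List.drop_eq_getElem_cons hi0
    have hdropi1 : s.drop (i+1) = s.getD (i+1) ' ' :: s.drop (i+2) := by
      rw [List.getD_eq_getElem _ _ hi1]; exact List.drop_eq_getElem_cons hi1
    have hpush : i = 0 ∨ pvCancel (s.getD (i-1) ' ') (s.getD i ' ') = false := by
      rcases Nat.eq_zero_or_pos i with h0 | hp
      · exact Or.inl h0
      · refine Or.inr ?_
        have := hpre (i-1) (by omega)
        rwa [show i - 1 + 1 = i by omega] at this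
    split
    · rename_i hcan
      have hif : (if i < 2 then 0 else i - 1) = i - 1 := by split <;> omega
      rw [hif]
      have hlen' : (s.take i ++ s.drop (i+2)).length = s.length - 2 := by
        simp [List.length_take, List.length_drop]; omega
      have hpre' : ∀ j, j + 1 ≤ i - 1 →
          pvCancel ((s.take i ++ s.drop (i+2)).getD j ' ')
            ((s.take i ++ s.drop (i+2)).getD (j+1) ' ') = false := by
        intro j hj
        rw [pvGetD_prefix s _ j i ' ' (by omega) (by omega),
            pvGetD_prefix s _ (j+1) i ' ' (by omega) (by omega)]
        exact hpre j (by omega)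
      rw [pvPalavraLoop_eq_stack (s.take i ++ s.drop (i+2)) (i-1) (by omega) hpre']
      -- both sides reduce to folding over s.drop (i+2) from stack (s.take i).reverse
      rw [hdropi, List.foldl_cons, hdropi1, List.foldl_cons,
          pvPushStep s i hi0 hpush, pvRevTakeSucc s i hi0]
      have hstep2 : pvStackStep (s.getD i ' ' :: (s.take i).reverse) (s.getD (i+1) ' ')
          = (s.take i).reverse := by
        simp only [pvStackStep, hcan, if_true]
      rw [hstep2]
      rcases Nat.eq_zero_or_pos i with h0 | hp
      · subst h0; simp
      · have htk : (s.take i ++ s.drop (i+2)).take (i-1) = s.take (i-1) := by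
          rw [List.take_append_of_le_length (by simp; omega), List.take_take]
          congr 1; omega
        have hdr : (s.take i ++ s.drop (i+2)).drop (i-1)
            = s.getD (i-1) ' ' :: s.drop (i+2) := by
          rw [List.drop_append_of_le_length (by simp; omega), List.drop_take]
          have h1 : s.drop (i-1) = s.getD (i-1) ' ' :: s.drop i := by
            rw [List.getD_eq_getElem _ _ (by omega : i - 1 < s.length)]
            have := List.drop_eq_getElem_cons (l := s) (by omega : i - 1 < s.length)
            rwa [show i - 1 + 1 = i by omega] at this
          rw [h1, show i - (i-1) = 1 by omega]
          simp
        rw [htk, hdr, List.foldl_cons]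
        have hpush' : pvStackStep ((s.take (i-1)).reverse) (s.getD (i-1) ' ')
            = (s.take i).reverse := by
          have hp2 : i - 1 = 0 ∨ pvCancel (s.getD (i-1-1) ' ') (s.getD (i-1) ' ') = false := by
            rcases Nat.lt_or_ge i 2 with h2 | h2
            · exact Or.inl (by omega)
            · refine Or.inr ?_
              have := hpre (i-2) (by omega)
              rw [show i - 2 + 1 = i - 1 by omega] at this
              rwa [show i - 1 - 1 = i - 2 by omega]
          have := pvPushStep s (i-1) (by omega) hp2
          rwa [show i - 1 + 1 = i by omega] at this
        rw [hpush']
    · rename_i hcan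
      have hcan' : pvCancel (s.getD i ' ') (s.getD (i+1) ' ') = false :=
        Bool.eq_false_iff.mpr hcan
      have hpre' : ∀ j, j + 1 ≤ i + 1 →
          pvCancel (s.getD j ' ') (s.getD (j+1) ' ') = false := by
        intro j hj
        rcases Nat.lt_or_ge (j+1) (i+1) with h' | h'
        · exact hpre j (by omega)
        · have : j = i := by omega
          subst this; exact hcan'
      rw [pvPalavraLoop_eq_stack s (i+1) (by omega) hpre',
          hdropi, List.foldl_cons, pvPushStep s i hi0 hpush]
  · rename_i h
    rcases Nat.lt_or_ge i s.length with hlt | hge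
    · -- i + 1 = s.length : one final push
      have hpush : i = 0 ∨ pvCancel (s.getD (i-1) ' ') (s.getD i ' ') = false := by
        rcases Nat.eq_zero_or_pos i with h0 | hp
        · exact Or.inl h0
        · refine Or.inr ?_
          have := hpre (i-1) (by omega)
          rwa [show i - 1 + 1 = i by omega] at this
      have hdropi : s.drop i = [s.getD i ' '] := by
        rw [List.getD_eq_getElem _ _ hlt]
        rw [List.drop_eq_getElem_cons hlt, List.drop_eq_nil_of_le (by omega)]
      rw [hdropi, List.foldl_cons, List.foldl_nil, pvPushStep s i hlt hpush,
          List.take_of_length_le (by omega), List.reverse_reverse]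
    · rw [List.drop_eq_nil_of_le hge, List.foldl_nil,
          List.take_of_length_le hge, List.reverse_reverse]
termination_by 2 * s.length - i
decreasing_by
  · omega
  · omega

theorem corrigir_palavra_eq (w : List Char) : corrigir_palavra w = pvCorrWord w := by
  have := pvPalavraLoop_eq_stack w 0 (Nat.zero_le _) (by omega)
  simpa [corrigir_palavra, pvCorrWord] using this

theorem pvLoop2_eq (l : List (List Char)) (p : List Char) (i2 : Nat)
    (h : ∀ w ∈ l.take i2, pvCondA p w = false) :
    pvLoop2 l p i2 = l.take i2 ++ (l.drop i2).filter (fun w => !pvCondA p w) := by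
  rw [pvLoop2]
  split
  · rename_i hlt
    have hv : l.getD i2 [] = l[i2] := List.getD_eq_getElem _ _ hlt
    have hsplit : l = l.take i2 ++ l[i2] :: l.drop (i2+1) := by
      conv_lhs => rw [← List.take_append_drop i2 l]
      rw [List.drop_eq_getElem_cons hlt]
    have hdropc : l.drop i2 = l[i2] :: l.drop (i2+1) := List.drop_eq_getElem_cons hlt
    split
    · rename_i hc
      have hmem : l.getD i2 [] ∈ l := by rw [hv]; exact List.getElem_mem hlt
      split
      · rename_i l' heq
        rw [PySem.List.remove?_eq_some_erase l _ hmem] at heq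
        injection heq with heq'
        have hnot : l[i2] ∉ l.take i2 := by
          intro hm
          have := h _ hm
          rw [hv] at hc
          rw [this] at hc
          exact Bool.false_ne_true hc
        have hl' : l' = l.take i2 ++ l.drop (i2+1) := by
          rw [← heq', hv]
          generalize hx : l[i2] = v at hsplit hnot
          conv_lhs => rw [hsplit]
          rw [List.erase_append_right _ hnot, List.erase_cons_head]
        have hlen' : l'.length = l.length - 1 := by
          rw [hl']; simp [List.length_take, List.length_drop]; omega
        have htake' : l'.take i2 = l.take i2 := by
          rw [hl', List.take_append_of_le_length (by simp; omega), List.take_take]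
          simp
        have hdrop' : l'.drop i2 = l.drop (i2+1) := by
          rw [hl', List.drop_append_of_le_length (by simp; omega), List.drop_take]
          simp
        rw [pvLoop2_eq l' p i2 (by rw [htake']; exact h)]
        rw [htake', hdrop', hdropc, List.filter_cons]
        rw [hv] at hc
        simp [hc]
      · rename_i heq
        rw [PySem.List.remove?_eq_none_iff] at heq
        exact absurd hmem heq
    · rename_i hc
      have hcf : pvCondA p (l.getD i2 []) = false := by simpa using hc
      have htk1 : l.take (i2+1) = l.take i2 ++ [l[i2]] := by
        rw [List.take_succ, List.getElem?_eq_getElem hlt]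
        simp
      rw [pvLoop2_eq l p (i2+1) ?hnew]
      case hnew =>
        intro w hw
        rw [htk1] at hw
        rcases List.mem_append.mp hw with hw1 | hw2
        · exact h w hw1
        · have : w = l[i2] := by simpa using hw2
          subst this
          rwa [hv] at hcf
      rw [hv] at hcf
      rw [htk1, hdropc, List.filter_cons, List.append_assoc]
      simp [hcf]
  · rename_i hge
    have hge' : l.length ≤ i2 := by omega
    rw [List.take_of_length_le hge', List.drop_eq_nil_of_le hge']
    simp
termination_by l.length - i2
decreasing_by
  all_goals omega

-- the greedy "keep the first of each anagram class" recursion both programs compute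
def pvG (ws : List (List Char)) : List (List Char) :=
  match ws with
  | [] => []
  | w :: rest => w :: pvG (rest.filter (fun u => !pvCondA w u))
termination_by ws.length
decreasing_by
  have h1 := List.length_filter_le (fun x : {u // u ∈ rest} => !pvCondA w x.1) rest.attach
  simp at h1 ⊢
  omega

theorem pvLoop1_eq (l : List (List Char)) (i1 : Nat)
    (hset : ∀ j, j < i1 → ∀ w ∈ l.drop (j+1), pvCondA (l.getD j []) w = false) :
    pvLoop1 l i1 = l.take i1 ++ pvG (l.drop i1) := by
  rw [pvLoop1]
  split
  · rename_i hlt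
    have hv : l.getD i1 [] = l[i1] := List.getD_eq_getElem _ _ hlt
    have hdropc : l.drop i1 = l[i1] :: l.drop (i1+1) := List.drop_eq_getElem_cons hlt
    have htk1 : l.take (i1+1) = l.take i1 ++ [l[i1]] := by
      rw [List.take_succ, List.getElem?_eq_getElem hlt]
      simp
    have hmem_take : ∀ w ∈ l.take i1, ∃ j, j < i1 ∧ l.getD j [] = w := by
      intro w hw
      obtain ⟨j, hj, hjw⟩ := List.mem_iff_getElem.mp hw
      have hj' : j < i1 := by simp at hj; omega
      have hjl : j < l.length := by simp at hj; omega
      refine ⟨j, hj', ?_⟩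
      rw [List.getD_eq_getElem _ _ hjl, ← hjw, List.getElem_take]
    have hgetmem : ∀ j, j + 1 ≤ i1 → l[i1] ∈ l.drop (j+1) := by
      intro j hj
      have h1 : i1 - (j+1) < (l.drop (j+1)).length := by simp; omega
      have h2 : (l.drop (j+1))[i1 - (j+1)]'h1 = l[i1] := by
        rw [List.getElem_drop]
        congr 1; omega
      rw [← h2]
      exact List.getElem_mem h1
    have h2' : ∀ w ∈ l.take (i1+1), pvCondA (l.getD i1 []) w = false := by
      intro w hw
      rw [htk1] at hw
      rcases List.mem_append.mp hw with hw1 | hw2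
      · obtain ⟨j, hj, rfl⟩ := hmem_take w hw1
        rw [pvCondA_comm, hv]
        exact hset j hj _ (hgetmem j (by omega))
      · have : w = l[i1] := by simpa using hw2
        subst this
        rw [hv]
        exact pvCondA_self _
    rw [pvLoop2_eq l (l.getD i1 []) (i1+1) h2']
    have hlentk : (l.take (i1+1)).length = i1 + 1 := by simp; omega
    have hset' : ∀ j, j < i1 + 1 →
        ∀ w ∈ (l.take (i1+1) ++ (l.drop (i1+1)).filter
            (fun w => !pvCondA (l.getD i1 []) w)).drop (j+1),
          pvCondA ((l.take (i1+1) ++ (l.drop (i1+1)).filter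
            (fun w => !pvCondA (l.getD i1 []) w)).getD j []) w = false := by
      intro j hj w hw
      rw [pvGetD_prefix l _ j (i1+1) [] (by omega) (by omega)]
      rw [List.drop_append_of_le_length (by omega)] at hw
      rcases List.mem_append.mp hw with hw1 | hw2
      · -- w is in the untouched prefix
        rw [List.drop_take] at hw1
        have hwd : w ∈ l.drop (j+1) := List.mem_of_mem_take hw1
        rcases Nat.lt_or_ge j i1 with hji | hji
        · exact hset j hji w hwd
        · -- j = i1 : the prefix part dropped is empty
          have : i1 + 1 - (j+1) = 0 := by omega
          rw [this] at hw1
          simp at hw1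
      · have hwf := List.mem_filter.mp hw2
        rcases Nat.lt_or_ge j i1 with hji | hji
        · have hwd : w ∈ l.drop (i1+1) := hwf.1
          have : w ∈ l.drop (j+1) := by
            rw [show i1 + 1 = (j+1) + (i1 - j) by omega, ← List.drop_drop] at hwd
            exact List.mem_of_mem_drop hwd
          exact hset j hji w this
        · have : j = i1 := by omega
          subst this
          simpa using hwf.2
    rw [pvLoop1_eq _ (i1+1) hset']
    have htkL : (l.take (i1+1) ++ (l.drop (i1+1)).filter
        (fun w => !pvCondA (l.getD i1 []) w)).take (i1+1) = l.take (i1+1) := by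
      rw [List.take_append_of_le_length (by omega), List.take_take]
      simp
    have hdrL : (l.take (i1+1) ++ (l.drop (i1+1)).filter
        (fun w => !pvCondA (l.getD i1 []) w)).drop (i1+1)
        = (l.drop (i1+1)).filter (fun w => !pvCondA (l.getD i1 []) w) := by
      rw [List.drop_append_of_le_length (by omega), List.drop_take]
      simp
    rw [htkL, hdrL, hdropc]
    rw [pvG]
    rw [htk1, List.append_assoc, hv]
    simp
  · rename_i hge
    have hge' : l.length ≤ i1 := by omega
    rw [List.take_of_length_le hge', List.drop_eq_nil_of_le hge']
    simp [pvG]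
termination_by l.length - i1
decreasing_by
  have hle := List.length_filter_le (fun w => !pvCondA (l.getD i1 []) w) (l.drop (i1+1))
  simp only [List.length_append] at *
  have h1 : (l.take (i1+1)).length = i1 + 1 := by simp; omega
  have h2 : (l.drop (i1+1)).length = l.length - (i1+1) := by simp
  omega

def pvG2 (kept : List (List Char)) (ws : List (List Char)) : List (List Char) :=
  match ws with
  | [] => []
  | w :: rest =>
    if kept.all (fun u => !pvCondA u w) then w :: pvG2 (kept ++ [w]) rest
    else pvG2 kept rest

def pvKeyB (w : List Char) : List Char :=
  PySem.List.sorted (PySem.Chars.lower w) (fun c => c) false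

theorem pvCondA_eq (u w : List Char) :
    pvCondA u w = ((pvKeyB u == pvKeyB w) && !(PySem.Chars.lower u == PySem.Chars.lower w)) :=
  rfl

theorem pvG_eq_pvG2 (ws kept : List (List Char)) :
    pvG (ws.filter (fun u => kept.all (fun v => !pvCondA v u))) = pvG2 kept ws := by
  induction ws generalizing kept with
  | nil => simp [pvG2, pvG]
  | cons w rest ih =>
    rw [pvG2]
    by_cases hb : kept.all (fun v => !pvCondA v w) = true
    · rw [List.filter_cons_of_pos (p := fun u => kept.all fun v => !pvCondA v u) hb, if_pos hb, pvG]
      congr 1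
      rw [List.filter_filter, ← ih (kept ++ [w])]
      congr 1
      apply List.filter_congr
      intro u _
      simp [List.all_append, Bool.and_comm]
    · rw [List.filter_cons_of_neg (p := fun u => kept.all fun v => !pvCondA v u) (by simpa using hb), if_neg hb]
      exact ih kept

def pvRepr (d : PySem.Dict (List Char) (List Char)) (kept : List (List Char)) : Prop :=
  (∀ u ∈ kept, d.get? (pvKeyB u) = some (PySem.Chars.lower u)) ∧
  (∀ k lo, d.get? k = some lo → ∃ u ∈ kept, pvKeyB u = k ∧ PySem.Chars.lower u = lo)

theorem pvBFold_eq (ws : List (List Char)) (d : PySem.Dict (List Char) (List Char))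
    (kept acc : List (List Char)) (hr : pvRepr d kept) :
    (ws.foldl pvBCore (d, acc)).2 = acc ++ pvG2 kept ws := by
  induction ws generalizing d kept acc with
  | nil => simp [pvG2]
  | cons w rest ih =>
    rw [List.foldl_cons, pvG2]
    rcases hget : d.get? (PySem.List.sorted (PySem.Chars.lower w) (fun c => c) false)
      with _ | v
    · -- key unseen: keep w and record its lowercase
      have hgk : d.get? (pvKeyB w) = none := hget
      have hall : kept.all (fun u => !pvCondA u w) = true := by
        rw [List.all_eq_true]
        intro u hu
        by_cases hk : pvKeyB u = pvKeyB w
        · exfalso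
          have h1 := hr.1 u hu
          rw [hk, hgk] at h1
          cases h1
        · simp [pvCondA_eq, hk]
      have hstep : pvBCore (d, acc) w
          = (d.insert (pvKeyB w) (PySem.Chars.lower w), acc ++ [w]) := by
        unfold pvBCore
        dsimp only
        rw [hget]
        rfl
      have hrep' : pvRepr (d.insert (pvKeyB w) (PySem.Chars.lower w)) (kept ++ [w]) := by
        constructor
        · intro u hu
          rcases List.mem_append.mp hu with hu1 | hu2
          · by_cases hk : pvKeyB u = pvKeyB w
            · exfalso
              have h1 := hr.1 u hu1
              rw [hk, hgk] at h1
              cases h1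
            · rw [PySem.Dict.get?_insert_of_ne d _ hk]
              exact hr.1 u hu1
          · have : u = w := by simpa using hu2
            subst this
            rw [PySem.Dict.get?_insert_self]
        · intro k lo hklo
          by_cases hk : k = pvKeyB w
          · subst hk
            rw [PySem.Dict.get?_insert_self] at hklo
            injection hklo with hlo
            exact ⟨w, by simp, rfl, hlo⟩
          · rw [PySem.Dict.get?_insert_of_ne d _ hk] at hklo
            obtain ⟨u, hu, h1, h2⟩ := hr.2 k lo hklo
            exact ⟨u, by simp [hu], h1, h2⟩
      rw [hstep, if_pos hall, ih _ _ _ hrep']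
      simp
    · -- key already seen, mapped to v
      have hgk : d.get? (pvKeyB w) = some v := hget
      by_cases hveq : v = PySem.Chars.lower w
      · subst hveq
        have hall : kept.all (fun u => !pvCondA u w) = true := by
          rw [List.all_eq_true]
          intro u hu
          by_cases hk : pvKeyB u = pvKeyB w
          · have h1 := hr.1 u hu
            rw [hk, hgk] at h1
            injection h1 with h1'
            simp [pvCondA_eq, h1']
          · simp [pvCondA_eq, hk]
        have hstep : pvBCore (d, acc) w = (d, acc ++ [w]) := by
          unfold pvBCore
          dsimp only
          rw [hget]
          simp
        have hrep' : pvRepr d (kept ++ [w]) := by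
          constructor
          · intro u hu
            rcases List.mem_append.mp hu with hu1 | hu2
            · exact hr.1 u hu1
            · have : u = w := by simpa using hu2
              subst this
              exact hgk
          · intro k lo hklo
            obtain ⟨u, hu, h1, h2⟩ := hr.2 k lo hklo
            exact ⟨u, by simp [hu], h1, h2⟩
        rw [hstep, if_pos hall, ih _ _ _ hrep']
        simp
      · -- a different-cased anagram was kept before: drop w
        obtain ⟨u, hu, hku, hlu⟩ := hr.2 _ v hgk
        have hcondu : pvCondA u w = true := by
          simp [pvCondA_eq, hku, hlu, hveq]
        have hallf : ¬ (kept.all (fun u => !pvCondA u w) = true) := by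
          rw [List.all_eq_true]
          push_neg
          exact ⟨u, hu, by simp [hcondu]⟩
        have hstep : pvBCore (d, acc) w = (d, acc) := by
          unfold pvBCore
          dsimp only
          rw [hget]
          simp [hveq]
        rw [hstep, if_neg hallf, ih _ _ _ hr]

theorem pvValidA_true (cs : List Char) (h1 : cs.all pvOkChar = true)
    (h2 : (cs.zip cs.tail).all
      (fun ab => !(PySem.Chars.isspace ab.1 && PySem.Chars.isspace ab.2)) = true) :
    ((List.range (cs.length - 1)).all fun i =>
      (cs.all pvOkChar) &&
      !(PySem.Chars.isspace (cs.getD i ' ') && PySem.Chars.isspace (cs.getD (i+1) ' '))) = true := by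
  rw [List.all_eq_true]
  intro i hi
  rw [List.mem_range] at hi
  have hi1 : i + 1 < cs.length := by omega
  have hi0 : i < cs.length := by omega
  rw [List.all_eq_true] at h2
  have hz : (cs[i], cs[i+1]) ∈ cs.zip cs.tail := by
    have hlt : i < (cs.zip cs.tail).length := by
      simp [List.length_zip, List.length_tail]; omega
    have : (cs.zip cs.tail)[i] = (cs[i], cs[i+1]) := by
      rw [List.getElem_zip]
      congr 1
      rw [List.getElem_tail]
    rw [← this]
    exact List.getElem_mem hlt
  have := h2 _ hz
  simp at this ⊢
  refine ⟨fun x hx => by rw [List.all_eq_true] at h1; exact h1 x hx, ?_⟩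
  rw [List.getElem?_eq_getElem hi0, List.getElem?_eq_getElem hi1]
  simpa using this

-- ===== VERDICT (by name: the statement is the Claim_ definition above) =====
theorem corrigir_doc_spec : Claim_equal_corrigir_doc := by
  unfold Claim_equal_corrigir_doc
  intro Texto _hdom hpre
  obtain ⟨hne, hall, hzip⟩ := hpre
  unfold Spec_corrigir_doc corrigir_doc corrigir_doc_alt
  dsimp only
  have hlen0 : ¬ (Texto.toList.length = 0) := by
    simpa [List.length_eq_zero_iff] using hne
  rw [if_neg hlen0, if_neg hlen0, pvValidA_true _ hall hzip]
  have hanyf : ¬ ((Texto.toList.zip Texto.toList.tail).any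
      (fun ab => PySem.Chars.isspace ab.1 && PySem.Chars.isspace ab.2) = true) := by
    rw [List.any_eq_true]
    rintro ⟨x, hx, hpx⟩
    have := List.all_eq_true.mp hzip x hx
    simp at this
    rcases this with h | h <;> simp [h] at hpx
  have hBall : ¬ ((!(Texto.toList.all pvOkChar)) = true) := by simp [hall]
  rw [if_neg hBall, if_neg hanyf]
  simp only [Bool.not_true, Bool.false_eq_true, if_false]
  congr 1
  congr 1
  -- A's nested removal loop computes the greedy anagram filter pvG
  have hA := pvLoop1_eq ((PySem.Chars.split₀ Texto.toList).map corrigir_palavra) 0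
    (by intro j hj; omega)
  rw [List.take_zero, List.drop_zero, List.nil_append] at hA
  rw [hA]
  -- the two word-correction routines agree
  have hmap : (PySem.Chars.split₀ Texto.toList).map corrigir_palavra
      = (PySem.Chars.split₀ Texto.toList).map pvCorrWord :=
    List.map_congr_left (fun w _ => corrigir_palavra_eq w)
  rw [hmap]
  -- B's single dict-pass computes the same greedy filter
  have hempty : pvRepr PySem.Dict.empty [] := by
    constructor
    · intro u hu; cases hu
    · intro k lo hk
      simp [PySem.Dict.get?, PySem.Dict.empty] at hk
  have hB := pvBFold_eq ((PySem.Chars.split₀ Texto.toList).map pvCorrWord)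
    PySem.Dict.empty [] [] hempty
  rw [List.foldl_map] at hB
  have hfold : (PySem.Chars.split₀ Texto.toList).foldl pvBStep (PySem.Dict.empty, [])
      = (PySem.Chars.split₀ Texto.toList).foldl
          (fun st p => pvBCore st (pvCorrWord p)) (PySem.Dict.empty, []) := rfl
  rw [hfold, hB, List.nil_append]
  -- pvG = pvG2 [] (empty kept set)
  have := pvG_eq_pvG2 ((PySem.Chars.split₀ Texto.toList).map pvCorrWord) []
  simpa using this
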